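-- pv_equiv track=rewrite | github.com/pypi-data/pypi-mirror-358 | packages/custom-pyvi/custom_pyvi-1.0.9-py3-none-any.whl/custom_pyvi/ViTokenizer.py | reconstruct_words
-- ===== SOURCE A (Python) =====
-- from typing import List, Dict, Tuple, Set, Optional
--
-- def reconstruct_words(tokens: List[str], labels: List[str]) -> List[str]:
--     """Ghép token thành cụm dựa nhãn IOB."""
--     words, buf = [], []
--     for tok, lab in zip(tokens, labels):
--         if lab == "B_W":
--             if buf: words.append("_".join(buf))
--             buf = [tok]
--         elif lab == "I_W":
--             buf.append(tok)
--         else: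
--             if buf: words.append("_".join(buf)); buf = []
--             words.append(tok)
--     if buf:
--         words.append("_".join(buf))
--     return words
-- ===== SOURCE B (Python) =====
-- def reconstruct_words(tokens, labels):
--     """Ghep token thanh cum dua nhan IOB.
--
--     Run-based: scan token/label pairs by index; a B_W or I_W head starts a
--     word and swallows the maximal following run of I_W labels in one inner
--     step; any other label is emitted as its own word.
--     """
--     pairs = list(zip(tokens, labels))
--     n = len(pairs)
--     words = []
--     i = 0
--     while i < n:
--         tok, lab = pairs[i]
--         if lab == "B_W" or lab == "I_W":
--             j = i + 1
--             while j < n and pairs[j][1] == "I_W":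
--                 j += 1
--             words.append("_".join(t for t, _ in pairs[i:j]))
--             i = j
--         else:
--             words.append(tok)
--             i += 1
--     return words
-- ===== Notes on version B (the rewrite author's own statement) =====
-- stated objective: alternative
-- what changed: Replaces A's stateful buffer-and-flush fold (buf carried across iterations, flushed at B_W/other/end) with a run-based scan that, at each B_W/I_W head, consumes the whole maximal run of following I_W labels at once and emits the joined word immediately; no buffer state survives between words.
import Mathlib
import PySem

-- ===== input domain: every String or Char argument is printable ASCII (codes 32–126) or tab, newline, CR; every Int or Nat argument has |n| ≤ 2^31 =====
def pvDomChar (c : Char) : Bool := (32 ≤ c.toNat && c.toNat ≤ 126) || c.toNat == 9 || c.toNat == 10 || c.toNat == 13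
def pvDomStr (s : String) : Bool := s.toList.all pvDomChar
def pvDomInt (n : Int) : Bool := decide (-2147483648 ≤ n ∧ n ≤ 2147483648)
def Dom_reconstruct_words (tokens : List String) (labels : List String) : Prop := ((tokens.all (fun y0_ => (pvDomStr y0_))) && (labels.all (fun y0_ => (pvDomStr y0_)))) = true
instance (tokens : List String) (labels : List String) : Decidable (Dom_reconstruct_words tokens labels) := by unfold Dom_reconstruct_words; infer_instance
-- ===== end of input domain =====

-- B replaces A's stateful buffer-and-flush fold by a run-based scan that emits each word
-- in one step by consuming the maximal run of I_W labels (objective: alternative).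

-- ===== PORT A =====
-- the for-loop of A over zip(tokens, labels), state = (words, buf)
def reconstructA : List (String × String) → List String → List String → List String
  | [], words, buf =>
    if buf.isEmpty then words else words ++ [PySem.Str.join "_" buf]
  | (tok, lab) :: rest, words, buf =>
    if lab == "B_W" then
      reconstructA rest (if buf.isEmpty then words else words ++ [PySem.Str.join "_" buf]) [tok]
    else if lab == "I_W" then
      reconstructA rest words (buf ++ [tok])
    else
      reconstructA rest ((if buf.isEmpty then words else words ++ [PySem.Str.join "_" buf]) ++ [tok]) []

def reconstruct_words (tokens : List String) (labels : List String) : List String :=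
  reconstructA (tokens.zip labels) [] []

-- ===== PORT B =====
-- the while-loop of B over the pair list: a B_W/I_W head swallows the maximal run of
-- following I_W labels in one step; any other label is its own word
def reconstructB : List (String × String) → List String
  | [] => []
  | (tok, lab) :: rest =>
    if lab == "B_W" || lab == "I_W" then
      PySem.Str.join "_" (tok :: (rest.takeWhile (fun p => p.2 == "I_W")).map Prod.fst)
        :: reconstructB (rest.dropWhile (fun p => p.2 == "I_W"))
    else
      tok :: reconstructB rest
termination_by l => l.length
decreasing_by
  · exact Nat.lt_succ_of_le (List.length_dropWhile_le _ _)
  · simp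

def reconstruct_words_alt (tokens : List String) (labels : List String) : List String :=
  reconstructB (tokens.zip labels)

-- ===== PRECONDITION & SPEC =====
def Spec_reconstruct_words (tokens : List String) (labels : List String) (out : List String) : Prop := out = reconstruct_words_alt tokens labels
instance (tokens : List String) (labels : List String) (out : List String) : Decidable (Spec_reconstruct_words tokens labels out) := by unfold Spec_reconstruct_words; infer_instance

-- ===== CLAIM (what is proved, stated in full; the proofs are below) =====
def Claim_equal_reconstruct_words : Prop := ∀ (tokens : List String) (labels : List String), Dom_reconstruct_words tokens labels → Spec_reconstruct_words tokens labels (reconstruct_words tokens labels)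

-- ===== LEMMAS AND PROOFS =====

-- A with an empty buffer behaves like B; with a nonempty buffer it first extends the
-- buffer through the maximal I_W run, flushes it, and then behaves like B.
lemma reconstruct_main (n : Nat) : ∀ (pairs : List (String × String)), pairs.length ≤ n →
    ((∀ words, reconstructA pairs words [] = words ++ reconstructB pairs) ∧
     (∀ words buf, buf ≠ [] → reconstructA pairs words buf =
        words ++ PySem.Str.join "_" (buf ++ (pairs.takeWhile (fun p => p.2 == "I_W")).map Prod.fst)
          :: reconstructB (pairs.dropWhile (fun p => p.2 == "I_W")))) := by
  induction n with
  | zero =>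
    intro pairs h
    have hp : pairs = [] := List.length_eq_zero_iff.mp (Nat.le_zero.mp h)
    subst hp
    constructor
    · intro words; simp [reconstructA, reconstructB]
    · intro words buf hbuf
      simp [reconstructA, reconstructB, List.isEmpty_iff, hbuf]
  | succ n ih =>
    intro pairs h
    rcases pairs with _ | ⟨⟨tok, lab⟩, rest⟩
    · constructor
      · intro words; simp [reconstructA, reconstructB]
      · intro words buf hbuf
        simp [reconstructA, reconstructB, List.isEmpty_iff, hbuf]
    · have hr : rest.length ≤ n := by simpa using Nat.succ_le_succ_iff.mp h
      have ihr := ih rest hr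
      constructor
      · intro words
        by_cases hB : lab = "B_W"
        · subst hB
          rw [reconstructA]
          simp [reconstructB, (ihr.2) words [tok] (by simp)]
        · by_cases hI : lab = "I_W"
          · subst hI
            rw [reconstructA]
            simp [reconstructB, (ihr.2) words [tok] (by simp)]
          · rw [reconstructA]
            simp [reconstructB, beq_eq_false_iff_ne.mpr hB, beq_eq_false_iff_ne.mpr hI,
              (ihr.1) (words ++ [tok])]
      · intro words buf hbuf
        by_cases hB : lab = "B_W"
        · subst hB
          rw [reconstructA]
          simp [reconstructB, List.isEmpty_iff, hbuf,
            (ihr.2) (words ++ [PySem.Str.join "_" buf]) [tok] (by simp)]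
        · by_cases hI : lab = "I_W"
          · subst hI
            rw [reconstructA]
            simp [(ihr.2) words (buf ++ [tok]) (by simp)]
          · rw [reconstructA]
            simp [reconstructB, beq_eq_false_iff_ne.mpr hB, beq_eq_false_iff_ne.mpr hI,
              List.isEmpty_iff, hbuf, ihr.1]

-- ===== VERDICT (by name: the statement is the Claim_ definition above) =====
theorem reconstruct_words_spec : Claim_equal_reconstruct_words := by
  intro tokens labels _
  unfold Spec_reconstruct_words reconstruct_words reconstruct_words_alt
  simpa using (reconstruct_main (tokens.zip labels).length (tokens.zip labels) le_rfl).1 []
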